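-- pv_equiv track=rewrite | github.com/ze-software/ze | scripts/dev/yang_move.py | match_under_prefix
-- ===== SOURCE A (Python) =====
-- def match_under_prefix(path_segs: list[str], under_segs: list[str],
--                        list_nodes: frozenset) -> int | None:
--     """Check if path_segs starts with the structural prefix under_segs.
--
--     List keys (segments following a list node name) are skipped in the
--     concrete path. Returns the index in path_segs right after the prefix
--     match, or None if no match.
--     """
--     pi = 0  # index into path_segs
--     ui = 0  # index into under_segs
--     while ui < len(under_segs) and pi < len(path_segs):
--         if path_segs[pi] != under_segs[ui]:
--             return None
--         pi += 1
--         # If this segment is a list node, skip the key value in the concrete path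
--         if under_segs[ui] in list_nodes and pi < len(path_segs):
--             pi += 1
--         ui += 1
--     if ui == len(under_segs):
--         return pi
--     return None
-- ===== SOURCE B (Python) =====
-- def match_under_prefix(path_segs: list[str], under_segs: list[str],
--                        list_nodes: frozenset) -> int | None:
--     # Build an expanded pattern: a literal token per segment, plus an
--     # optional-wildcard token (None) after each list-node segment.
--     tokens = []
--     for seg in under_segs:
--         tokens.append(seg)
--         if seg in list_nodes:
--             tokens.append(None)
--     # Match the pattern against path_segs with a single cursor.
--     pi = 0
--     for tok in tokens:
--         if tok is None:
--             if pi < len(path_segs):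
--                 pi += 1
--         else:
--             if pi >= len(path_segs) or path_segs[pi] != tok:
--                 return None
--             pi += 1
--     return pi
-- ===== Notes on version B (the rewrite author's own statement) =====
-- stated objective: alternative
-- what changed: B splits A's interleaved while-loop (which advances two cursors and decides skips inline) into two phases: first compile under_segs into an expanded token list (literal per segment, optional-wildcard after each list-node segment), then match that uniform token list against path_segs with a single cursor.
import Mathlib
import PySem

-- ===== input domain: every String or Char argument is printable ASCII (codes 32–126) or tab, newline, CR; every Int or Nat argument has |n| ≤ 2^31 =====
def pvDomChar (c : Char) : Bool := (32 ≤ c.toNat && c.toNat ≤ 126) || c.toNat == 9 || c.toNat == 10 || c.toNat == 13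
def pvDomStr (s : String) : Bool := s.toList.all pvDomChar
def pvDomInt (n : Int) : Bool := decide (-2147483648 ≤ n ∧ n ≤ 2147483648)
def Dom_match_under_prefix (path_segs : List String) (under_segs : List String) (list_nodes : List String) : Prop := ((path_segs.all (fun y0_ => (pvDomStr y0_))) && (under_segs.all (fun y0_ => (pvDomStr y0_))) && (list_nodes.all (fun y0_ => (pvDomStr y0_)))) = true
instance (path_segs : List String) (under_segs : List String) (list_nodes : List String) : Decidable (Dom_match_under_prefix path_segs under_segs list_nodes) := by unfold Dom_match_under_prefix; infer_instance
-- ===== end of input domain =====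

-- B replaces A's interleaved two-cursor while-loop by a compile-pattern phase (literal token per
-- segment, optional wildcard after list-node segments) plus a uniform one-cursor match phase
-- (objective: alternative decomposition, same cost).

-- ===== PORT A =====
-- A's while loop over indices pi (into path_segs) and ui (into under_segs); indexing is
-- guarded by the loop condition, so List.getD is exact here.
def mupLoopA (path_segs under_segs list_nodes : List String) (pi ui : Nat) : Option Int :=
  if _h : ui < under_segs.length ∧ pi < path_segs.length then
    if path_segs.getD pi "" ≠ under_segs.getD ui "" then none
    else
      let pi1 := pi + 1
      let pi2 := if under_segs.getD ui "" ∈ list_nodes ∧ pi1 < path_segs.length then pi1 + 1 else pi1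
      mupLoopA path_segs under_segs list_nodes pi2 (ui + 1)
  else if ui = under_segs.length then some (pi : Int) else none
termination_by under_segs.length - ui
decreasing_by omega

def match_under_prefix (path_segs : List String) (under_segs : List String) (list_nodes : List String) : Option Int :=
  mupLoopA path_segs under_segs list_nodes 0 0

-- ===== PORT B =====
-- phase 1: expanded token list (some s = literal, none = optional wildcard)
def mupTokens (under_segs list_nodes : List String) : List (Option String) :=
  under_segs.foldl
    (fun acc seg => acc ++ (if seg ∈ list_nodes then [some seg, none] else [some seg])) []

-- phase 2: match the tokens against path_segs with one cursor
def mupScan (path_segs : List String) : List (Option String) → Nat → Option Int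
  | [], pi => some (pi : Int)
  | none :: ts, pi => mupScan path_segs ts (if pi < path_segs.length then pi + 1 else pi)
  | some s :: ts, pi =>
      if pi ≥ path_segs.length ∨ path_segs.getD pi "" ≠ s then none
      else mupScan path_segs ts (pi + 1)

def match_under_prefix_alt (path_segs : List String) (under_segs : List String) (list_nodes : List String) : Option Int :=
  mupScan path_segs (mupTokens under_segs list_nodes) 0

-- ===== PRECONDITION & SPEC =====
def Spec_match_under_prefix (path_segs : List String) (under_segs : List String) (list_nodes : List String) (out : Option Int) : Prop := out = match_under_prefix_alt path_segs under_segs list_nodes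
instance (path_segs : List String) (under_segs : List String) (list_nodes : List String) (out : Option Int) : Decidable (Spec_match_under_prefix path_segs under_segs list_nodes out) := by unfold Spec_match_under_prefix; infer_instance

-- ===== CLAIM (what is proved, stated in full; the proofs are below) =====
def Claim_equal_match_under_prefix : Prop := ∀ (path_segs : List String) (under_segs : List String) (list_nodes : List String), Dom_match_under_prefix path_segs under_segs list_nodes → Spec_match_under_prefix path_segs under_segs list_nodes (match_under_prefix path_segs under_segs list_nodes)

-- ===== LEMMAS AND PROOFS =====

-- structural restatement of A's loop (recursion on the remaining under-suffix)
def mupStep (path_segs list_nodes : List String) : List String → Nat → Option Int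
  | [], pi => some (pi : Int)
  | u :: us, pi =>
      if pi < path_segs.length then
        if path_segs.getD pi "" ≠ u then none
        else mupStep path_segs list_nodes us
          (if u ∈ list_nodes ∧ pi + 1 < path_segs.length then pi + 1 + 1 else pi + 1)
      else none

def mupFlat (under_segs list_nodes : List String) : List (Option String) :=
  under_segs.flatMap (fun seg => if seg ∈ list_nodes then [some seg, none] else [some seg])

theorem mupTokens_eq_flat (under_segs list_nodes : List String) :
    mupTokens under_segs list_nodes = mupFlat under_segs list_nodes := by
  unfold mupTokens mupFlat
  rw [PySem.List.foldl_append_eq_flatMap]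
  simp

theorem mupLoop_eq_step (path_segs under_segs list_nodes : List String) :
    ∀ ui, ui ≤ under_segs.length → ∀ pi, mupLoopA path_segs under_segs list_nodes pi ui
      = mupStep path_segs list_nodes (under_segs.drop ui) pi := by
  intro ui
  induction' h : under_segs.length - ui using Nat.strong_induction_on with n ih generalizing ui
  intro hle pi
  rw [mupLoopA]
  by_cases hui : ui < under_segs.length
  · have hdrop : under_segs.drop ui = under_segs[ui] :: under_segs.drop (ui + 1) :=
      (List.getElem_cons_drop hui).symm
    have hu : under_segs.getD ui "" = under_segs[ui] := by
      simp [List.getD_eq_getElem?_getD, List.getElem?_eq_getElem hui]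
    rw [hdrop, mupStep]
    by_cases hpi : pi < path_segs.length
    · rw [dif_pos ⟨hui, hpi⟩, if_pos hpi, hu]
      by_cases hne : path_segs.getD pi "" = under_segs[ui]
      · rw [if_neg (by simpa [List.getD] using hne),
            if_neg (by simpa [List.getD] using hne)]
        exact ih (under_segs.length - (ui + 1)) (by omega) (ui + 1) rfl (by omega) _
      · rw [if_pos (by simpa [List.getD] using hne), if_pos (by simpa [List.getD] using hne)]
    · rw [dif_neg (by tauto), if_neg hpi, if_neg (by omega)]
  · have hstop : ui = under_segs.length := by omega
    have heq : under_segs.drop ui = [] := List.drop_of_length_le (by omega)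
    rw [dif_neg (by tauto), heq, mupStep, if_pos hstop]

theorem mupStep_eq_scan (path_segs list_nodes : List String) :
    ∀ us pi, mupStep path_segs list_nodes us pi
      = mupScan path_segs (mupFlat us list_nodes) pi := by
  intro us
  induction us with
  | nil => intro pi; simp [mupStep, mupFlat, mupScan]
  | cons u rest ih =>
    intro pi
    by_cases hpi : pi < path_segs.length
    · by_cases hne : path_segs.getD pi "" = u
      · by_cases hmem : u ∈ list_nodes <;>
          simp [mupStep, mupFlat, mupScan, hpi, hmem, ih,
                show ¬ path_segs.length ≤ pi from by omega]
      · have hne' : ¬ path_segs[pi] = u := by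
          simpa [List.getD, List.getElem?_eq_getElem hpi] using hne
        by_cases hmem : u ∈ list_nodes <;>
          simp [mupStep, mupFlat, mupScan, hpi, hne', hmem]
    · by_cases hmem : u ∈ list_nodes <;>
        simp [mupStep, mupFlat, mupScan, hpi, hmem, show path_segs.length ≤ pi from by omega]

-- ===== VERDICT (by name: the statement is the Claim_ definition above) =====
theorem match_under_prefix_spec : Claim_equal_match_under_prefix := by
  intro path_segs under_segs list_nodes _hdom
  unfold Spec_match_under_prefix match_under_prefix match_under_prefix_alt
  rw [mupTokens_eq_flat, mupLoop_eq_step path_segs under_segs list_nodes 0 (by omega),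
      mupStep_eq_scan, List.drop_zero]
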